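-- pv_equiv track=rewrite | github.com/ersinkoc/PhantomStrike | tools/_custom/ssl-analyzer.py | grade_ssl
-- ===== SOURCE A (Python) =====
-- def grade_ssl(issues):
--     """Calculate an SSL grade based on findings."""
--     if any(s == "CRITICAL" for s, _ in issues):
--         return "F"
--     highs = sum(1 for s, _ in issues if s == "HIGH")
--     meds = sum(1 for s, _ in issues if s == "MEDIUM")
--     if highs >= 2:
--         return "D"
--     if highs == 1:
--         return "C"
--     if meds >= 2:
--         return "B-"
--     if meds == 1:
--         return "B"
--     return "A"
-- ===== SOURCE B (Python) =====
-- _GRADES = ("A", "B", "B-", "C", "C", "C", "D", "D", "D")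
--
--
-- def grade_ssl(issues):
--     """Tally severities into a dict, then look the grade up in a precomputed table."""
--     counts = {"CRITICAL": 0, "HIGH": 0, "MEDIUM": 0}
--     for s, _ in issues:
--         if s in counts:
--             counts[s] += 1
--     if counts["CRITICAL"]:
--         return "F"
--     return _GRADES[3 * min(counts["HIGH"], 2) + min(counts["MEDIUM"], 2)]
-- ===== Notes on version B (the rewrite author's own statement) =====
-- stated objective: alternative
-- what changed: Replaces A's short-circuit-plus-branch-ladder with a dictionary tally over all findings followed by an arithmetic index (3*min(highs,2)+min(meds,2)) into a precomputed 9-entry grade table.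
import Mathlib
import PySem

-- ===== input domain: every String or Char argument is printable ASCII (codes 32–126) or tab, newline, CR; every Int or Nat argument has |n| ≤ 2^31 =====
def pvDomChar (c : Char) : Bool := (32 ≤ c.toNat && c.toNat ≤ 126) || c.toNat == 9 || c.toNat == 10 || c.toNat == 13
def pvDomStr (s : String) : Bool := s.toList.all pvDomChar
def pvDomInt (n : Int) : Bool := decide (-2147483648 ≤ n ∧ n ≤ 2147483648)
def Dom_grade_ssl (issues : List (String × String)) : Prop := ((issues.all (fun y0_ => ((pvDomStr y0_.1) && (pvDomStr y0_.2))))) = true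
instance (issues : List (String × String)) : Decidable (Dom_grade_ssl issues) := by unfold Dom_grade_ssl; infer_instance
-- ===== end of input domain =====

-- B replaces A's short-circuit check and branch ladder by a dict tally plus an
-- arithmetic index into a precomputed grade table (alternative decomposition; same cost).

-- ===== PORT A =====
def grade_ssl (issues : List (String × String)) : String :=
  if issues.any (fun p => p.1 == "CRITICAL") then "F"
  else
    let highs : Int := (issues.countP (fun p => p.1 == "HIGH") : Int)
    let meds : Int := (issues.countP (fun p => p.1 == "MEDIUM") : Int)
    if highs ≥ 2 then "D"
    else if highs = 1 then "C"
    else if meds ≥ 2 then "B-"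
    else if meds = 1 then "B"
    else "A"

-- ===== PORT B =====
-- _GRADES table of Source B
def pvGrades : List String := ["A", "B", "B-", "C", "C", "C", "D", "D", "D"]

def grade_ssl_alt (issues : List (String × String)) : String :=
  let counts0 : PySem.Dict String Int :=
    PySem.Dict.ofList [("CRITICAL", 0), ("HIGH", 0), ("MEDIUM", 0)]
  let counts := issues.foldl
    (fun d p => if d.contains p.1 then d.modify p.1 0 (· + 1) else d) counts0
  if counts.getD "CRITICAL" 0 ≠ 0 then "F"
  else
    -- the index 3*min(highs,2)+min(meds,2) is always within 0..8, so pyGet? is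
    -- some and the .getD default is unreachable (Source B indexes the tuple directly)
    (PySem.List.pyGet? pvGrades
      (3 * min (counts.getD "HIGH" 0) 2 + min (counts.getD "MEDIUM" 0) 2)).getD "A"

-- ===== PRECONDITION & SPEC =====
def Spec_grade_ssl (issues : List (String × String)) (out : String) : Prop := out = grade_ssl_alt issues
instance (issues : List (String × String)) (out : String) : Decidable (Spec_grade_ssl issues out) := by unfold Spec_grade_ssl; infer_instance

-- ===== CLAIM (what is proved, stated in full; the proofs are below) =====
def Claim_equal_grade_ssl : Prop := ∀ (issues : List (String × String)), Dom_grade_ssl issues → Spec_grade_ssl issues (grade_ssl issues)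

-- ===== LEMMAS AND PROOFS =====

-- the tally fold adds, at every key the dict already contains, the number of findings with that severity
theorem tally_getD (l : List (String × String)) (d : PySem.Dict String Int) (k : String)
    (hk : d.contains k = true) :
    (l.foldl (fun d p => if d.contains p.1 then d.modify p.1 0 (· + 1) else d) d).getD k 0
      = d.getD k 0 + (l.countP (fun p => p.1 == k) : Int) := by
  induction l generalizing d with
  | nil => simp
  | cons x rest ih =>
    obtain ⟨s, t⟩ := x
    simp only [List.foldl_cons, List.countP_cons]
    by_cases hc : d.contains s = true
    · rw [if_pos hc, ih _ (by simp [PySem.Dict.contains_modify, hk]),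
          PySem.Dict.getD_modify]
      by_cases hks : k = s
      · subst hks
        simp only [beq_self_eq_true, if_pos]
        push_cast
        ring
      · rw [if_neg hks]
        have : ((s, t).1 == k) = false := by simp [Ne.symm hks]
        simp [this]
    · rw [if_neg hc, ih _ hk]
      have hks : s ≠ k := fun h => hc (h ▸ hk)
      have : ((s, t).1 == k) = false := by simp [hks]
      simp [this]

-- the 9-entry table at index 3*min(h,2)+min(m,2) agrees with A's branch ladder
theorem table_eq_ladder (h m : Nat) :
    (PySem.List.pyGet? pvGrades (3 * min (h : Int) 2 + min (m : Int) 2)).getD "A"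
      = (if (h : Int) ≥ 2 then "D"
         else if (h : Int) = 1 then "C"
         else if (m : Int) ≥ 2 then "B-"
         else if (m : Int) = 1 then "B"
         else "A") := by
  have ha : min (h : Int) 2 = 0 ∨ min (h : Int) 2 = 1 ∨ min (h : Int) 2 = 2 := by omega
  have hb : min (m : Int) 2 = 0 ∨ min (m : Int) 2 = 1 ∨ min (m : Int) 2 = 2 := by omega
  rcases ha with ha | ha | ha <;> rcases hb with hb | hb | hb <;>
    rw [ha, hb] <;>
    · split_ifs <;> first
        | rfl
        | (exfalso; omega)

-- ===== VERDICT (by name: the statement is the Claim_ definition above) =====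
theorem grade_ssl_spec : Claim_equal_grade_ssl := by
  intro issues _
  simp only [Spec_grade_ssl, grade_ssl, grade_ssl_alt]
  rw [tally_getD _ _ "CRITICAL" (by decide), tally_getD _ _ "HIGH" (by decide),
      tally_getD _ _ "MEDIUM" (by decide)]
  have hC : (PySem.Dict.ofList [("CRITICAL", (0 : Int)), ("HIGH", 0), ("MEDIUM", 0)]).getD "CRITICAL" 0 = 0 := by decide
  have hH : (PySem.Dict.ofList [("CRITICAL", (0 : Int)), ("HIGH", 0), ("MEDIUM", 0)]).getD "HIGH" 0 = 0 := by decide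
  have hM : (PySem.Dict.ofList [("CRITICAL", (0 : Int)), ("HIGH", 0), ("MEDIUM", 0)]).getD "MEDIUM" 0 = 0 := by decide
  rw [hC, hH, hM, zero_add, zero_add, zero_add]
  by_cases hcrit : issues.any (fun p => p.1 == "CRITICAL") = true
  · have hpos : issues.countP (fun p => p.1 == "CRITICAL") ≠ 0 := by
      rcases List.any_eq_true.mp hcrit with ⟨x, hx, hpx⟩
      have := List.countP_pos_iff (p := fun p : String × String => p.1 == "CRITICAL").mpr ⟨x, hx, hpx⟩
      omega
    have hBp : (issues.countP (fun p => p.1 == "CRITICAL") : Int) ≠ 0 := by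
      exact_mod_cast hpos
    rw [if_pos hcrit, if_pos hBp]
  · have hz : issues.countP (fun p => p.1 == "CRITICAL") = 0 := by
      rw [List.countP_eq_zero]
      intro a ha hpa
      exact hcrit (List.any_eq_true.mpr ⟨a, ha, hpa⟩)
    have hBz : ¬ ((issues.countP (fun p => p.1 == "CRITICAL") : Int) ≠ 0) := by
      simp [hz]
    rw [if_neg hcrit, if_neg hBz]
    exact (table_eq_ladder _ _).symm
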